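-- pv_equiv track=rewrite | github.com/LeoLord19/ROTBUSTER | ROTBUSTER.py | decrypt_rot
-- ===== SOURCE A (Python) =====
-- def decrypt_rot(text, rot):
--     decrypted_text = ""
--     for char in text:
--         if char.isalpha():  # Verificar si el carácter es una letra
--             shift = 26 - rot  # Calcular el desplazamiento inverso
--             if char.islower():
--                 # Descifrar letras minúsculas
--                 decrypted_text += chr((ord(char) - ord('a') + shift) % 26 + ord('a'))
--             else:
--                 # Descifrar letras mayúsculas
--                 decrypted_text += chr((ord(char) - ord('A') + shift) % 26 + ord('A'))
--         else:
--             # Si no es una letra, añadir el carácter tal cual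
--             decrypted_text += char
--     return decrypted_text
-- ===== SOURCE B (Python) =====
-- def decrypt_rot(text, rot):
--     # Table-driven: build the 52-letter translation table once, then translate in one pass.
--     k = (26 - rot) % 26
--     src = 'abcdefghijklmnopqrstuvwxyz' + 'ABCDEFGHIJKLMNOPQRSTUVWXYZ'
--     dst = ''.join(chr((i + k) % 26 + ord('a')) for i in range(26)) + \
--           ''.join(chr((i + k) % 26 + ord('A')) for i in range(26))
--     return text.translate(str.maketrans(src, dst))
-- ===== Notes on version B (the rewrite author's own statement) =====
-- stated objective: idiomatic
-- what changed: Replaces A's per-character branch-and-shift arithmetic with string += accumulation by a precomputed 52-letter str.maketrans translation table applied in a single C-level text.translate pass.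
import Mathlib
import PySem

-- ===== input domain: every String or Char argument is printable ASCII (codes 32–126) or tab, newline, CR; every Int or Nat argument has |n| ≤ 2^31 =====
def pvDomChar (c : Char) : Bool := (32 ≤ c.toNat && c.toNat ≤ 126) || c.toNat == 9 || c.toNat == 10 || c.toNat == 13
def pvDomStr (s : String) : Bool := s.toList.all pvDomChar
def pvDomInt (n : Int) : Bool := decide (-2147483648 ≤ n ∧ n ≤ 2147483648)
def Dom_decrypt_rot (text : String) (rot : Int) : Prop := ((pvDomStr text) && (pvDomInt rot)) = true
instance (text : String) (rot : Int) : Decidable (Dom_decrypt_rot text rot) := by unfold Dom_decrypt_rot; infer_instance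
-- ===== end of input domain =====

set_option maxRecDepth 20000
set_option maxHeartbeats 1000000


-- B replaces A's per-character shift arithmetic by a precomputed 52-letter translation table
-- (str.maketrans/str.translate style); same O(n) cost, more idiomatic.

-- ===== PORT A =====
-- chr/ord are ported by hand as Char.ofNat / Char.toNat: exact here, chr's argument is in 65..122.
def decrypt_rot (text : String) (rot : Int) : String :=
  text.toList.foldl (fun decrypted_text char =>
    if PySem.Chars.isalpha char then
      let shift : Int := 26 - rot
      if PySem.Chars.islower char then
        decrypted_text ++ String.ofList [Char.ofNat (PySem.Int.mod ((char.toNat : Int) - 97 + shift) 26 + 97).toNat]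
      else
        decrypted_text ++ String.ofList [Char.ofNat (PySem.Int.mod ((char.toNat : Int) - 65 + shift) 26 + 65).toNat]
    else
      decrypted_text ++ String.ofList [char]) ""

-- ===== PORT B =====
-- str.maketrans(src, dst) is the mapping {src[i] ↦ dst[i]} (a PySem.Dict); text.translate(table)
-- maps every character through the table, characters that are not keys pass through unchanged.
def decrypt_rot_alt (text : String) (rot : Int) : String :=
  let k : Int := PySem.Int.mod (26 - rot) 26
  let src : List Char := "abcdefghijklmnopqrstuvwxyz".toList ++ "ABCDEFGHIJKLMNOPQRSTUVWXYZ".toList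
  let dst : List Char :=
    (PySem.List.pyRange 0 26 1).map (fun i => Char.ofNat (PySem.Int.mod (i + k) 26 + 97).toNat)
    ++ (PySem.List.pyRange 0 26 1).map (fun i => Char.ofNat (PySem.Int.mod (i + k) 26 + 65).toNat)
  let table : PySem.Dict Char Char := PySem.Dict.ofList (src.zip dst)
  String.ofList (text.toList.map (fun c => table.getD c c))

-- ===== PRECONDITION & SPEC =====
def Spec_decrypt_rot (text : String) (rot : Int) (out : String) : Prop := out = decrypt_rot_alt text rot
instance (text : String) (rot : Int) (out : String) : Decidable (Spec_decrypt_rot text rot out) := by unfold Spec_decrypt_rot; infer_instance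

-- ===== CLAIM (what is proved, stated in full; the proofs are below) =====
def Claim_equal_decrypt_rot : Prop := ∀ (text : String) (rot : Int), Dom_decrypt_rot text rot → Spec_decrypt_rot text rot (decrypt_rot text rot)

-- ===== LEMMAS AND PROOFS =====

/-- A's per-character transformation, factored out of the fold. -/
def pvAChar (rot : Int) (char : Char) : Char :=
  if PySem.Chars.isalpha char then
    if PySem.Chars.islower char then
      Char.ofNat (PySem.Int.mod ((char.toNat : Int) - 97 + (26 - rot)) 26 + 97).toNat
    else
      Char.ofNat (PySem.Int.mod ((char.toNat : Int) - 65 + (26 - rot)) 26 + 65).toNat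
  else char

/-- B's source alphabet (lowercase then uppercase). -/
def pvSrc : List Char := "abcdefghijklmnopqrstuvwxyz".toList ++ "ABCDEFGHIJKLMNOPQRSTUVWXYZ".toList

/-- B's target alphabet for a given rot. -/
def pvDst (rot : Int) : List Char :=
  (PySem.List.pyRange 0 26 1).map (fun i => Char.ofNat (PySem.Int.mod (i + PySem.Int.mod (26 - rot) 26) 26 + 97).toNat)
  ++ (PySem.List.pyRange 0 26 1).map (fun i => Char.ofNat (PySem.Int.mod (i + PySem.Int.mod (26 - rot) 26) 26 + 65).toNat)

/-- B's translation table. -/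
def pvTable (rot : Int) : PySem.Dict Char Char := PySem.Dict.ofList (pvSrc.zip (pvDst rot))

lemma pv_alt_eq (text : String) (rot : Int) :
    decrypt_rot_alt text rot = String.ofList (text.toList.map (fun c => (pvTable rot).getD c c)) := rfl

lemma pv_foldA (rot : Int) (l : List Char) (acc : String) :
    l.foldl (fun decrypted_text char =>
      if PySem.Chars.isalpha char then
        let shift : Int := 26 - rot
        if PySem.Chars.islower char then
          decrypted_text ++ String.ofList [Char.ofNat (PySem.Int.mod ((char.toNat : Int) - 97 + shift) 26 + 97).toNat]
        else
          decrypted_text ++ String.ofList [Char.ofNat (PySem.Int.mod ((char.toNat : Int) - 65 + shift) 26 + 65).toNat]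
      else
        decrypted_text ++ String.ofList [char]) acc
    = acc ++ String.ofList (l.map (pvAChar rot)) := by
  induction l generalizing acc with
  | nil =>
    apply String.toList_inj.mp
    simp
  | cons c l ih =>
    simp only [List.foldl, List.map, ih]
    apply String.toList_inj.mp
    simp only [pvAChar]
    split_ifs <;> simp

lemma pv_items_update_of_nodup {κ ν : Type} [BEq κ] [LawfulBEq κ]
    (ps : List (κ × ν)) (d : PySem.Dict κ ν)
    (h : ∀ p ∈ ps, p.1 ∉ d.items.map Prod.fst)
    (hnd : (ps.map Prod.fst).Nodup) :
    (d.update ps).items = d.items ++ ps := by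
  induction ps generalizing d with
  | nil => simp [PySem.Dict.update]
  | cons p ps ih =>
    have hcont : d.contains p.1 = false := by
      simp only [PySem.Dict.contains, List.any_eq_false]
      intro q hq
      simp only [beq_iff_eq]
      intro he
      exact h p (by simp) (he ▸ List.mem_map_of_mem hq)
    have hins : (d.insert p.1 p.2).items = d.items ++ [p] := by
      simp [PySem.Dict.insert, hcont]
    have hstep : (d.update (p :: ps)) = ((d.insert p.1 p.2).update ps) := rfl
    rw [hstep, ih]
    · simp [hins]
    · intro q hq
      rw [hins]
      simp only [List.map_append, List.mem_append]
      rintro (hin | hin)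
      · exact h q (by simp [hq]) hin
      · simp only [List.map_cons, List.map_nil, List.mem_cons] at hin
        rcases hin with hin | hin
        · simp only [List.map_cons, List.nodup_cons] at hnd
          exact hnd.1 (hin ▸ List.mem_map_of_mem hq)
        · simp at hin
    · simpa using hnd.of_cons

lemma pv_find?_zip_nodup {α β : Type} [BEq α] [LawfulBEq α]
    (xs : List α) (ys : List β) (h : xs.Nodup) (i : Nat)
    (hi : i < xs.length) (hl : i < ys.length) :
    List.find? (fun p => p.1 == xs[i]) (xs.zip ys) = some (xs[i], ys[i]) := by
  induction xs generalizing ys i with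
  | nil => simp at hi
  | cons x xs ih =>
    cases ys with
    | nil => simp at hl
    | cons y ys =>
      cases i with
      | zero => simp
      | succ i =>
        have hx : x ≠ (x :: xs)[i+1] := by
          intro he
          have : (x :: xs)[i+1] ∈ xs := by
            simp only [List.getElem_cons_succ]
            exact List.getElem_mem (by simpa using hi)
          rw [← he] at this
          exact (List.nodup_cons.mp h).1 this
        have hb : (x == (x :: xs)[i+1]) = false := by simpa using hx
        simp only [List.zip_cons_cons, List.find?_cons, hb]
        simpa using ih ys (List.nodup_cons.mp h).2 i (by simpa using hi) (by simpa using hl)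

lemma pv_pointwise (rot : Int) (c : Char) :
    pvAChar rot c = (pvTable rot).getD c c := by
  have hlow : "abcdefghijklmnopqrstuvwxyz".toList = (List.range 26).map (fun i => Char.ofNat (97+i)) := by decide
  have hup : "ABCDEFGHIJKLMNOPQRSTUVWXYZ".toList = (List.range 26).map (fun i => Char.ofNat (65+i)) := by decide
  have hrange : PySem.List.pyRange 0 26 1 = (List.range 26).map (Nat.cast) := by decide
  set K : Int := PySem.Int.mod (26 - rot) 26 with hK
  set src : List Char := pvSrc with hsrcdef
  set dst : List Char := pvDst rot with hdstdef
  have hsrc : src = "abcdefghijklmnopqrstuvwxyz".toList ++ "ABCDEFGHIJKLMNOPQRSTUVWXYZ".toList := rfl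
  have hdst : dst =
    (PySem.List.pyRange 0 26 1).map (fun i => Char.ofNat ((PySem.Int.mod (i + K) 26 + 97).toNat))
    ++ (PySem.List.pyRange 0 26 1).map (fun i => Char.ofNat ((PySem.Int.mod (i + K) 26 + 65).toNat)) := rfl
  have htbl : pvTable rot = PySem.Dict.ofList (src.zip dst) := rfl
  rw [htbl]
  have hsrcnd : src.Nodup := by rw [hsrc]; decide
  have hsrclen : src.length = 52 := by rw [hsrc]; decide
  have hdstlen : dst.length = 52 := by
    rw [hdst, hrange]; simp
  have hitems : (PySem.Dict.ofList (src.zip dst)).items = src.zip dst := by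
    rw [PySem.Dict.ofList]
    rw [pv_items_update_of_nodup]
    · simp [PySem.Dict.empty]
    · simp [PySem.Dict.empty]
    · rw [List.map_fst_zip (by omega)]
      exact hsrcnd
  have hgetD : ∀ x : Char, (PySem.Dict.ofList (src.zip dst)).getD x x
      = (Option.map Prod.snd (List.find? (fun p => p.1 == x) (src.zip dst))).getD x := by
    intro x
    rw [PySem.Dict.getD, PySem.Dict.get?, hitems]
  rw [hgetD]
  have hsrcget : ∀ (i : Nat) (hi : i < 52), src[i]'(by omega)
      = if i < 26 then Char.ofNat (97 + i) else Char.ofNat (65 + (i - 26)) := by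
    intro i hi
    rw [List.getElem_of_eq (hsrc.trans (by rw [hlow, hup]))]
    by_cases h26 : i < 26
    · rw [List.getElem_append_left (by simpa using h26)]
      simp [h26]
    · rw [List.getElem_append_right (by simpa using h26)]
      simp [h26]
  have hdstget : ∀ (i : Nat) (hi : i < 52), dst[i]'(by omega)
      = if i < 26 then Char.ofNat ((PySem.Int.mod ((i:Int) + K) 26 + 97).toNat)
        else Char.ofNat ((PySem.Int.mod (((i:Nat) - 26 : Nat) + K) 26 + 65).toNat) := by
    intro i hi
    rw [List.getElem_of_eq (hdst.trans (by rw [hrange]))]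
    by_cases h26 : i < 26
    · rw [List.getElem_append_left (by simpa using h26)]
      simp [h26]
    · rw [List.getElem_append_right (by simpa using h26)]
      simp [h26]
  by_cases halpha : PySem.Chars.isalpha c
  · have hKbounds : 0 ≤ K ∧ K < 26 := ⟨PySem.Int.mod_nonneg _ (by norm_num), PySem.Int.mod_lt _ (by norm_num)⟩
    have hKe : K = (26 - rot) % 26 := by rw [hK, PySem.Int.mod_eq_emod_of_pos (by norm_num)]
    by_cases hlower : PySem.Chars.islower c
    · have hb : 97 ≤ c.toNat ∧ c.toNat ≤ 122 := by
        simpa [PySem.Chars.islower, Char.le_def, UInt32.le_iff_toNat_le] using hlower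
      set i : Nat := c.toNat - 97 with hi
      have hi52 : i < 52 := by omega
      have hci : src[i]'(by omega) = c := by
        rw [hsrcget i hi52, if_pos (by omega)]
        have : 97 + i = c.toNat := by omega
        rw [this, Char.ofNat_toNat]
      have hfind := pv_find?_zip_nodup src dst hsrcnd i (by omega) (by omega)
      rw [hci] at hfind
      rw [hfind]
      simp only [Option.map_some, Option.getD_some]
      rw [hdstget i hi52, if_pos (by omega)]
      simp only [pvAChar, halpha, hlower, if_pos]
      refine congrArg Char.ofNat ?_
      rw [PySem.Int.mod_eq_emod_of_pos (by norm_num), PySem.Int.mod_eq_emod_of_pos (by norm_num), hKe]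
      omega
    · have hupper : PySem.Chars.isupper c := by
        simp only [PySem.Chars.isalpha, Bool.or_eq_true] at halpha
        rcases halpha with h | h
        · exact h
        · exact absurd h hlower
      have hb : 65 ≤ c.toNat ∧ c.toNat ≤ 90 := by
        simpa [PySem.Chars.isupper, Char.le_def, UInt32.le_iff_toNat_le] using hupper
      set i : Nat := 26 + (c.toNat - 65) with hi
      have hi52 : i < 52 := by omega
      have hci : src[i]'(by omega) = c := by
        rw [hsrcget i hi52, if_neg (by omega)]
        have : 65 + (i - 26) = c.toNat := by omega
        rw [this, Char.ofNat_toNat]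
      have hfind := pv_find?_zip_nodup src dst hsrcnd i (by omega) (by omega)
      rw [hci] at hfind
      rw [hfind]
      simp only [Option.map_some, Option.getD_some]
      rw [hdstget i hi52, if_neg (by omega)]
      simp only [pvAChar, halpha, hlower, if_pos]
      refine congrArg Char.ofNat ?_
      rw [PySem.Int.mod_eq_emod_of_pos (by norm_num), PySem.Int.mod_eq_emod_of_pos (by norm_num), hKe]
      omega
  · have hnone : List.find? (fun p => p.1 == c) (src.zip dst) = none := by
      rw [List.find?_eq_none]
      intro p hp
      have hmem : p.1 ∈ src := (List.of_mem_zip hp).1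
      have halphamem : ∀ x ∈ src, PySem.Chars.isalpha x = true := by
        rw [hsrc, hlow, hup]
        intro x hx
        simp only [List.mem_append, List.mem_map, List.mem_range] at hx
        rcases hx with ⟨i, hi, rfl⟩ | ⟨i, hi, rfl⟩ <;> interval_cases i <;> decide
      simp only [beq_iff_eq]
      intro he
      exact halpha (he ▸ halphamem p.1 hmem)
    rw [hnone]
    simp [pvAChar, halpha]

-- ===== VERDICT (by name: the statement is the Claim_ definition above) =====
theorem decrypt_rot_spec : Claim_equal_decrypt_rot := by
  intro text rot _hdom
  unfold Spec_decrypt_rot decrypt_rot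
  rw [pv_foldA, pv_alt_eq]
  apply String.toList_inj.mp
  simp only [String.toList_append, String.toList_ofList]
  have : text.toList.map (pvAChar rot) = text.toList.map (fun c => (pvTable rot).getD c c) :=
    List.map_congr_left (fun c _ => pv_pointwise rot c)
  simp [this]
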